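-- pv_equiv track=rewrite | github.com/markusrobertjonsson/diffusionmodel | torsten.py | torstenify
-- ===== SOURCE A (Python) =====
-- def torstenify(x, y):
--     d = dict()
--     for xval, yval in zip(x, y):
--         if xval not in d:
--             d[xval] = yval
--
--     xvals = list(d.keys())
--     xvals.sort()
--     outx = []
--     outy = []
--     for xval in xvals:
--         outx.append(xval)
--         outy.append(d[xval])
--     return outx, outy
-- ===== SOURCE B (Python) =====
-- def torstenify(x, y):
--     pairs = sorted(zip(x, y), key=lambda p: p[0])
--     outx = []
--     outy = []
--     prev = 0
--     first = True
--     for xv, yv in pairs: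
--         if first or xv != prev:
--             outx.append(xv)
--             outy.append(yv)
--             prev = xv
--             first = False
--     return outx, outy
-- ===== Notes on version B (the rewrite author's own statement) =====
-- stated objective: simpler
-- what changed: Replaces A's dict-of-first-occurrences plus key-sort plus per-key dict lookup by one stable sort of the zipped pairs followed by a single linear pass that emits a pair whenever its x differs from the previously emitted x.
import Mathlib
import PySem

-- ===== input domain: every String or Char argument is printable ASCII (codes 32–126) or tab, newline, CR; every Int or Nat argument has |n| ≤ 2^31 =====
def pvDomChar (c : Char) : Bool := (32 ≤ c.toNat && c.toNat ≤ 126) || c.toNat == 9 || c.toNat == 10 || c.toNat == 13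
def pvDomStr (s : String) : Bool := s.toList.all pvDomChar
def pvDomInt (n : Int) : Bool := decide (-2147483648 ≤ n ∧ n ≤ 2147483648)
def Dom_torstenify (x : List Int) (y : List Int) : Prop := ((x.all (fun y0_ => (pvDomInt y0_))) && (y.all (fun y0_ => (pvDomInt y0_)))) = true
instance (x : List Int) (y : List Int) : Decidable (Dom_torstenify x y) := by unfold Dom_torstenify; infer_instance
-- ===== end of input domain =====

-- B replaces A's first-occurrence dict + key sort + per-key lookup by a stable sort of the
-- zipped pairs followed by one linear dedupe pass (objective: simpler). No argument is mutated.

-- ===== PORT A =====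
-- literal port of A: build dict of first occurrences, sort its keys, then append key/value pairs.
-- d[xval] is ported as d.getD xval 0: xval ranges over d.keys, so the key is always present and
-- Python's KeyError is unreachable (the default 0 is never used; proved via dfold_get? below).
def torstenify (x : List Int) (y : List Int) : List Int × List Int :=
  let d := (x.zip y).foldl
      (fun (d : PySem.Dict Int Int) (p : Int × Int) =>
        if d.contains p.1 then d else d.insert p.1 p.2) PySem.Dict.empty
  let xvals := PySem.List.sorted d.keys (fun v => v) false
  let out := xvals.foldl
      (fun (acc : List Int × List Int) xv => (acc.1 ++ [xv], acc.2 ++ [d.getD xv 0]))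
      (([] : List Int), ([] : List Int))
  out

-- ===== PORT B =====
-- literal port of B: stable sort of zip(x, y) by first component, then one pass with
-- state (first, prev, outx, outy) emitting a pair when first is set or its x differs from prev.
def torstenify_alt (x : List Int) (y : List Int) : List Int × List Int :=
  let pairs := PySem.List.sorted (x.zip y) (fun p => p.1) false
  let st := pairs.foldl
      (fun (st : Bool × Int × List Int × List Int) (p : Int × Int) =>
        if st.1 || p.1 != st.2.1 then (false, p.1, st.2.2.1 ++ [p.1], st.2.2.2 ++ [p.2]) else st)
      (true, 0, ([] : List Int), ([] : List Int))
  (st.2.2.1, st.2.2.2)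

-- ===== PRECONDITION & SPEC =====
def Spec_torstenify (x : List Int) (y : List Int) (out : List Int × List Int) : Prop := out = torstenify_alt x y
instance (x : List Int) (y : List Int) (out : List Int × List Int) : Decidable (Spec_torstenify x y out) := by unfold Spec_torstenify; infer_instance

-- ===== CLAIM (what is proved, stated in full; the proofs are below) =====
def Claim_equal_torstenify : Prop := ∀ (x : List Int) (y : List Int), Dom_torstenify x y → Spec_torstenify x y (torstenify x y)

-- ===== LEMMAS AND PROOFS =====

-- first occurrence of each key (first component), in list order
def firstsK : List (Int × Int) → List (Int × Int)
  | [] => []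
  | p :: t => p :: firstsK (t.filter (fun q => q.1 != p.1))
termination_by m => m.length
decreasing_by
  have h := List.length_filter_le (fun q : {q // q ∈ t} => q.1.1 != p.1) t.attach
  simp at h ⊢; omega

lemma attach_filter_eq (t : List (Int × Int)) (p : Int × Int) :
    (t.attach.filter (fun x => x.1.1 != p.1)).unattach = t.filter (fun q => q.1 != p.1) := by
  rw [List.unattach_filter (g := fun q => q.1 != p.1) (hf := fun x h => rfl)]
  simp

lemma fk_mem {q : Int × Int} : ∀ {m : List (Int × Int)}, q ∈ firstsK m → q ∈ m := by
  intro m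
  induction m using firstsK.induct with
  | case1 => simp [firstsK]
  | case2 p t ih =>
    simp only [attach_filter_eq] at ih
    intro h
    rw [firstsK] at h
    rcases List.mem_cons.mp h with h | h
    · simp [h]
    · exact List.mem_cons_of_mem _ (List.mem_of_mem_filter (ih h))

lemma find?_filter_ne (t : List (Int × Int)) (v k : Int) (h : k ≠ v) :
    (t.filter (fun q => q.1 != v)).find? (fun r => r.1 == k) = t.find? (fun r => r.1 == k) := by
  induction t with
  | nil => rfl
  | cons a t ih =>
    by_cases hav : a.1 = v
    · simp [hav, show (v == k) = false by simp [Ne.symm h], ih]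
    · by_cases hak : a.1 = k
      · simp [hak, h]
      · simp [show (a.1 != v) = true by simp [hav],
              show (a.1 == k) = false by simp [hak], ih]

lemma fk_find? {q : Int × Int} : ∀ {m : List (Int × Int)},
    q ∈ firstsK m ↔ m.find? (fun r => r.1 == q.1) = some q := by
  intro m
  induction m using firstsK.induct with
  | case1 => simp [firstsK]
  | case2 p t ih =>
    simp only [attach_filter_eq] at ih
    rw [firstsK]
    constructor
    · intro h
      rcases List.mem_cons.mp h with h | h
      · subst h; simp
      · have hne : q.1 ≠ p.1 := by
          have := List.of_mem_filter (fk_mem h)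
          simpa using this
        rw [List.find?_cons, show (p.1 == q.1) = false by simp [Ne.symm hne]]
        rw [← find?_filter_ne t p.1 q.1 hne]
        exact ih.mp h
    · intro h
      rw [List.find?_cons] at h
      by_cases hp : p.1 = q.1
      · rw [show (p.1 == q.1) = true by simp [hp]] at h
        exact List.mem_cons.mpr (Or.inl (Option.some.inj h).symm)
      · rw [show (p.1 == q.1) = false by simp [hp]] at h
        rw [← find?_filter_ne t p.1 q.1 (Ne.symm hp)] at h
        exact List.mem_cons.mpr (Or.inr (ih.mpr h))

lemma fk_fst_mem {k : Int} : ∀ {m : List (Int × Int)},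
    k ∈ (firstsK m).map Prod.fst ↔ k ∈ m.map Prod.fst := by
  intro m
  induction m using firstsK.induct with
  | case1 => simp [firstsK]
  | case2 p t ih =>
    simp only [attach_filter_eq] at ih
    rw [firstsK]
    simp only [List.map_cons, List.mem_cons]
    constructor
    · rintro (h | h)
      · exact Or.inl h
      · rcases List.mem_map.mp (ih.mp h) with ⟨q, hq, hq2⟩
        exact Or.inr (List.mem_map.mpr ⟨q, List.mem_of_mem_filter hq, hq2⟩)
    · rintro (h | h)
      · exact Or.inl h
      · rcases List.mem_map.mp h with ⟨q, hq, hq2⟩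
        by_cases hqp : q.1 = p.1
        · exact Or.inl (by omega)
        · exact Or.inr (ih.mpr (List.mem_map.mpr ⟨q, List.mem_filter.mpr ⟨hq, by simp [hqp]⟩, hq2⟩))

lemma fk_nodup_fst : ∀ (m : List (Int × Int)), ((firstsK m).map Prod.fst).Nodup := by
  intro m
  induction m using firstsK.induct with
  | case1 => simp [firstsK]
  | case2 p t ih =>
    simp only [attach_filter_eq] at ih
    rw [firstsK]
    simp only [List.map_cons, List.nodup_cons]
    refine ⟨fun h => ?_, ih⟩
    rcases List.mem_map.mp h with ⟨q, hq, hq2⟩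
    have := List.of_mem_filter (fk_mem hq)
    simp [hq2] at this

lemma fk_pairwise : ∀ {m : List (Int × Int)},
    m.Pairwise (fun a b => a.1 ≤ b.1) → (firstsK m).Pairwise (fun a b => a.1 < b.1) := by
  intro m
  induction m using firstsK.induct with
  | case1 => simp [firstsK]
  | case2 p t ih =>
    simp only [attach_filter_eq] at ih
    intro hp
    rw [firstsK]
    rcases List.pairwise_cons.mp hp with ⟨hhead, htail⟩
    refine List.pairwise_cons.mpr ⟨?_, ih (htail.filter _)⟩
    intro q hq
    have hqf := fk_mem hq
    have hle := hhead q (List.mem_of_mem_filter hqf)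
    have hne : q.1 ≠ p.1 := by have := List.of_mem_filter hqf; simpa using this
    omega

lemma insertBy_filter_key (p : Int × Int) (k : Int) :
    ∀ (acc : List (Int × Int)), acc.Pairwise (fun a b => a.1 ≤ b.1) →
    (PySem.List.insertBy (fun a b => decide (a.1 < b.1)) p acc).filter (fun a => a.1 == k)
    = acc.filter (fun a => a.1 == k) ++ if p.1 == k then [p] else [] := by
  intro acc
  induction acc with
  | nil => intro _; by_cases h : p.1 = k <;> simp [PySem.List.insertBy, h]
  | cons y ys ih =>
    intro hp
    rcases List.pairwise_cons.mp hp with ⟨hhead, htail⟩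
    rw [PySem.List.insertBy]
    by_cases hlt : p.1 < y.1
    · rw [if_pos (by simpa using hlt)]
      by_cases hpk : p.1 = k
      · have hnil : (y :: ys).filter (fun a => a.1 == k) = [] := by
          rw [List.filter_eq_nil_iff]
          intro a ha
          rcases List.mem_cons.mp ha with rfl | ha
          · simp; omega
          · have := hhead a ha; simp; omega
        rw [List.filter_cons, hnil]
        simp [hpk]
      · simp [List.filter_cons, hpk]
    · rw [if_neg (by simpa using hlt)]
      by_cases hyk : y.1 = k
      · simp [hyk, ih htail]
      · simp [hyk, ih htail]

lemma sorted_filter_key (l : List (Int × Int)) (k : Int) :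
    (PySem.List.sorted l (fun p => p.1) false).filter (fun a => a.1 == k)
    = l.filter (fun a => a.1 == k) := by
  induction l using List.reverseRecOn with
  | nil => rfl
  | append_singleton l a ih =>
    have hs : PySem.List.sorted (l ++ [a]) (fun p => p.1) false
        = PySem.List.insertBy (fun x b => decide (x.1 < b.1)) a (PySem.List.sorted l (fun p => p.1) false) := by
      rw [PySem.List.sorted_eq_foldl_insertBy, PySem.List.sorted_eq_foldl_insertBy, List.foldl_append]
      simp
    rw [hs, insertBy_filter_key a k _ (PySem.List.sorted_pairwise l (fun p => p.1)), ih,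
        List.filter_append]
    simp [List.filter_cons]

lemma sorted_find_key (l : List (Int × Int)) (k : Int) :
    (PySem.List.sorted l (fun p => p.1) false).find? (fun a => a.1 == k)
    = l.find? (fun a => a.1 == k) := by
  rw [← List.head?_filter, ← List.head?_filter, sorted_filter_key]

def dfold (l : List (Int × Int)) (d : PySem.Dict Int Int) : PySem.Dict Int Int :=
  l.foldl (fun d p => if d.contains p.1 then d else d.insert p.1 p.2) d

lemma contains_iff_get? (d : PySem.Dict Int Int) (k : Int) :
    d.contains k = (d.get? k).isSome := by
  simp only [PySem.Dict.contains, PySem.Dict.get?, Option.isSome_map]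
  rw [Bool.eq_iff_iff]
  simp [List.any_eq_true, List.find?_isSome]

lemma dfold_get? : ∀ (l : List (Int × Int)) (d : PySem.Dict Int Int) (k : Int),
    (dfold l d).get? k = (d.get? k).or ((l.find? (fun q => q.1 == k)).map Prod.snd) := by
  intro l
  induction l with
  | nil => intro d k; simp [dfold]
  | cons p t ih =>
    intro d k
    have hstep : dfold (p :: t) d
        = dfold t (if d.contains p.1 then d else d.insert p.1 p.2) := rfl
    rw [hstep]
    by_cases hc : d.contains p.1 = true
    · rw [if_pos hc, ih]
      rw [List.find?_cons]
      by_cases hpk : p.1 = k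
      · have hsome : (d.get? k).isSome := by rw [← contains_iff_get?, ← hpk]; exact hc
        rcases Option.isSome_iff_exists.mp hsome with ⟨v, hv⟩
        simp [hv, hpk]
      · simp [show (p.1 == k) = false by simp [hpk]]
    · rw [if_neg hc]
      have hins : (d.insert p.1 p.2).items = d.items ++ [(p.1, p.2)] := by
        simp [PySem.Dict.insert, hc]
      rw [ih]
      have hget : (d.insert p.1 p.2).get? k
          = (d.get? k).or (if p.1 = k then some p.2 else none) := by
        simp only [PySem.Dict.get?, hins, List.find?_append]
        by_cases hpk : p.1 = k
        · subst hpk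
          simp [Prod.mk.eta]
        · simp [hpk]
      rw [hget, List.find?_cons]
      by_cases hpk : p.1 = k
      · have hnone : d.get? k = none := by
          rw [← hpk]
          rcases Option.eq_none_or_eq_some (d.get? p.1) with h | ⟨v, hv⟩
          · exact h
          · exfalso; apply hc; rw [contains_iff_get?, hv]; rfl
        simp [hnone, hpk]
      · simp [hpk, show (p.1 == k) = false by simp [hpk]]

lemma dfold_keys_mem : ∀ (l : List (Int × Int)) (d : PySem.Dict Int Int) (k : Int),
    k ∈ (dfold l d).keys ↔ k ∈ d.keys ∨ k ∈ l.map Prod.fst := by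
  intro l
  induction l with
  | nil => intro d k; simp [dfold]
  | cons p t ih =>
    intro d k
    have hstep : dfold (p :: t) d
        = dfold t (if d.contains p.1 then d else d.insert p.1 p.2) := rfl
    rw [hstep]
    by_cases hc : d.contains p.1 = true
    · rw [if_pos hc, ih]
      have hmem : p.1 ∈ d.keys := by
        simp only [PySem.Dict.contains, List.any_eq_true] at hc
        rcases hc with ⟨q, hq, hq2⟩
        exact List.mem_map.mpr ⟨q, hq, by simpa using hq2⟩
      constructor
      · rintro (h | h)
        · exact Or.inl h
        · exact Or.inr (List.mem_cons.mpr (Or.inr (by simpa using h)))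
      · rintro (h | h)
        · exact Or.inl h
        · rcases List.mem_cons.mp (by simpa using h : k ∈ p.1 :: t.map Prod.fst) with rfl | h
          · exact Or.inl hmem
          · exact Or.inr (by simpa using h)
    · rw [if_neg hc, ih]
      have hins : (d.insert p.1 p.2).keys = d.keys ++ [p.1] := by
        simp [PySem.Dict.keys, PySem.Dict.insert, hc]
      rw [hins]
      simp only [List.mem_append, List.map_cons, List.mem_cons]
      tauto

lemma dfold_keys_nodup : ∀ (l : List (Int × Int)) (d : PySem.Dict Int Int),
    d.keys.Nodup → (dfold l d).keys.Nodup := by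
  intro l
  induction l with
  | nil => intro d h; simpa [dfold] using h
  | cons p t ih =>
    intro d h
    have hstep : dfold (p :: t) d
        = dfold t (if d.contains p.1 then d else d.insert p.1 p.2) := rfl
    rw [hstep]
    by_cases hc : d.contains p.1 = true
    · rw [if_pos hc]; exact ih d h
    · rw [if_neg hc]
      apply ih
      have hins : (d.insert p.1 p.2).keys = d.keys ++ [p.1] := by
        simp [PySem.Dict.keys, PySem.Dict.insert, hc]
      rw [hins]
      refine List.Nodup.append h (List.nodup_singleton _) ?_
      intro a ha hb
      rcases List.mem_singleton.mp hb with rfl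
      apply hc
      simp only [PySem.Dict.keys] at ha
      rcases List.mem_map.mp ha with ⟨q, hq, hq2⟩
      simp only [PySem.Dict.contains, List.any_eq_true]
      exact ⟨q, hq, by simp [hq2]⟩

lemma foldB_false : ∀ (m : List (Int × Int)) (v : Int) (ox oy : List Int),
    m.Pairwise (fun a b => a.1 ≤ b.1) → (∀ q ∈ m, v ≤ q.1) →
    (m.foldl
      (fun (st : Bool × Int × List Int × List Int) (p : Int × Int) =>
        if st.1 || p.1 != st.2.1 then (false, p.1, st.2.2.1 ++ [p.1], st.2.2.2 ++ [p.2]) else st)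
      (false, v, ox, oy)).2.2
    = (ox ++ (firstsK (m.filter (fun q => q.1 != v))).map Prod.fst,
       oy ++ (firstsK (m.filter (fun q => q.1 != v))).map Prod.snd) := by
  intro m
  induction m with
  | nil => intro v ox oy _ _; simp [firstsK]
  | cons q t ih =>
    intro v ox oy hp hv
    rcases List.pairwise_cons.mp hp with ⟨hhead, htail⟩
    rw [List.foldl_cons]
    by_cases hqv : q.1 = v
    · rw [show (if (false || q.1 != v) then ((false : Bool), q.1, ox ++ [q.1], oy ++ [q.2])
            else ((false : Bool), v, ox, oy)) = (false, v, ox, oy) by simp [hqv]]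
      rw [ih v ox oy htail (fun r hr => hv r (List.mem_cons_of_mem _ hr))]
      simp [hqv]
    · rw [show (if (false || q.1 != v) then ((false : Bool), q.1, ox ++ [q.1], oy ++ [q.2])
            else ((false : Bool), v, ox, oy)) = (false, q.1, ox ++ [q.1], oy ++ [q.2]) by simp [hqv]]
      rw [ih q.1 (ox ++ [q.1]) (oy ++ [q.2]) htail hhead]
      have hvq : v < q.1 := lt_of_le_of_ne (hv q (List.mem_cons_self)) (Ne.symm hqv)
      have hfe : t.filter (fun r => r.1 != v) = t := by
        rw [List.filter_eq_self]
        intro r hr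
        have := hhead r hr
        simp; omega
      have hcf : (q :: t).filter (fun r => r.1 != v) = q :: t := by
        simp [hqv, hfe]
      rw [hcf, firstsK]
      simp [List.append_assoc]

lemma foldB_true (m : List (Int × Int)) (hp : m.Pairwise (fun a b => a.1 ≤ b.1)) :
    (m.foldl
      (fun (st : Bool × Int × List Int × List Int) (p : Int × Int) =>
        if st.1 || p.1 != st.2.1 then (false, p.1, st.2.2.1 ++ [p.1], st.2.2.2 ++ [p.2]) else st)
      (true, 0, ([] : List Int), ([] : List Int))).2.2
    = ((firstsK m).map Prod.fst, (firstsK m).map Prod.snd) := by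
  cases m with
  | nil => simp [firstsK]
  | cons q t =>
    rcases List.pairwise_cons.mp hp with ⟨hhead, htail⟩
    rw [List.foldl_cons]
    rw [show (if ((true : Bool) || q.1 != 0) then ((false : Bool), q.1, ([] : List Int) ++ [q.1], ([] : List Int) ++ [q.2])
          else ((true : Bool), 0, ([] : List Int), ([] : List Int)))
        = (false, q.1, [q.1], [q.2]) by simp]
    rw [foldB_false t q.1 [q.1] [q.2] htail hhead]
    rw [firstsK]
    simp

theorem main_eq (x y : List Int) : torstenify x y = torstenify_alt x y := by
  have hp : (PySem.List.sorted (x.zip y) (fun p => p.1) false).Pairwise (fun a b => a.1 ≤ b.1) :=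
    PySem.List.sorted_pairwise _ _
  have hB : torstenify_alt x y
      = ((firstsK (PySem.List.sorted (x.zip y) (fun p => p.1) false)).map Prod.fst,
         (firstsK (PySem.List.sorted (x.zip y) (fun p => p.1) false)).map Prod.snd) := by
    have h := foldB_true (PySem.List.sorted (x.zip y) (fun p => p.1) false) hp
    simp only [torstenify_alt]
    rw [show ∀ (a : Bool × Int × List Int × List Int), (a.2.2.1, a.2.2.2) = a.2.2 from fun a => rfl]
    exact h
  rw [hB]
  set l := x.zip y with hl
  set m := PySem.List.sorted l (fun p => p.1) false with hm
  set S := firstsK m with hS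
  have hkeys_nodup : (dfold l PySem.Dict.empty).keys.Nodup := by
    apply dfold_keys_nodup
    simp [PySem.Dict.empty, PySem.Dict.keys]
  have hxvals : PySem.List.sorted (dfold l PySem.Dict.empty).keys (fun v => v) false
      = S.map Prod.fst := by
    apply PySem.List.sorted_eq_of_perm_of_pairwise_lt
    · apply (List.perm_ext_iff_of_nodup (fk_nodup_fst m) hkeys_nodup).mpr
      intro k
      rw [fk_fst_mem, dfold_keys_mem]
      simp only [PySem.Dict.empty, PySem.Dict.keys, List.map_nil, List.not_mem_nil, false_or]
      constructor
      · intro h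
        rcases List.mem_map.mp h with ⟨q, hq, hq2⟩
        exact List.mem_map.mpr ⟨q, (PySem.List.mem_sorted _ _ _ _).mp hq, hq2⟩
      · intro h
        rcases List.mem_map.mp h with ⟨q, hq, hq2⟩
        exact List.mem_map.mpr ⟨q, (PySem.List.mem_sorted _ _ _ _).mpr hq, hq2⟩
    · exact List.pairwise_map.mpr (by simpa using fk_pairwise hp)
  have hval : ∀ p ∈ S, (dfold l PySem.Dict.empty).getD p.1 0 = p.2 := by
    intro p hps
    have h1 : m.find? (fun r => r.1 == p.1) = some p := fk_find?.mp hps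
    have h2 : l.find? (fun r => r.1 == p.1) = some p := by
      rw [← sorted_find_key l p.1]; exact h1
    rw [show (dfold l PySem.Dict.empty).getD p.1 0 = ((dfold l PySem.Dict.empty).get? p.1).getD 0 from rfl]
    rw [dfold_get? l PySem.Dict.empty p.1]
    simp [PySem.Dict.get?, PySem.Dict.empty, h2]
  show (let d := l.foldl (fun (d : PySem.Dict Int Int) (p : Int × Int) =>
          if d.contains p.1 then d else d.insert p.1 p.2) PySem.Dict.empty
        let xvals := PySem.List.sorted d.keys (fun v => v) false
        let out := xvals.foldl
          (fun (acc : List Int × List Int) xv => (acc.1 ++ [xv], acc.2 ++ [d.getD xv 0]))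
          (([] : List Int), ([] : List Int))
        out) = _
  simp only []
  rw [show (l.foldl (fun (d : PySem.Dict Int Int) (p : Int × Int) =>
        if d.contains p.1 then d else d.insert p.1 p.2) PySem.Dict.empty) = dfold l PySem.Dict.empty from rfl]
  rw [PySem.List.foldl_prod_mk (fun s e => s ++ [e])
        (fun s e => s ++ [(dfold l PySem.Dict.empty).getD e 0]),
      PySem.List.foldl_append_singleton,
      PySem.List.foldl_append_singleton_eq_map, hxvals]
  simp only [List.nil_append]
  refine Prod.ext rfl ?_
  rw [List.map_map]
  exact List.map_congr_left hval

-- ===== VERDICT (by name: the statement is the Claim_ definition above) =====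
theorem torstenify_spec : Claim_equal_torstenify := by
  intro x y _
  unfold Spec_torstenify
  exact main_eq x y
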